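-- pv_equiv track=rewrite | github.com/WeienHsu/parsing_stock_price | parsing_and_upload_to_drive.py | special_str_to_int
-- ===== SOURCE A (Python) =====
-- def special_str_to_int(str):
--     a = str.split(",")
--     interval = len(a)
--
--     result = 0
--     count = 0
--     for i in range(interval-1, -1, -1):
--         result += int(a[i]) * pow(10, count*3)
--         count +=1
--     return result
-- ===== SOURCE B (Python) =====
-- def special_str_to_int(str):
--     result = 0
--     for group in str.split(","):
--         result = result * 1000 + int(group)
--     return result
-- ===== Notes on version B (the rewrite author's own statement) =====
-- stated objective: simpler
-- what changed: Replaces the reversed index loop with pow(10, 3*count) per group by a left-to-right Horner accumulation result = result*1000 + int(group), dropping the exponentiation and the index/count state.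
import Mathlib
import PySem

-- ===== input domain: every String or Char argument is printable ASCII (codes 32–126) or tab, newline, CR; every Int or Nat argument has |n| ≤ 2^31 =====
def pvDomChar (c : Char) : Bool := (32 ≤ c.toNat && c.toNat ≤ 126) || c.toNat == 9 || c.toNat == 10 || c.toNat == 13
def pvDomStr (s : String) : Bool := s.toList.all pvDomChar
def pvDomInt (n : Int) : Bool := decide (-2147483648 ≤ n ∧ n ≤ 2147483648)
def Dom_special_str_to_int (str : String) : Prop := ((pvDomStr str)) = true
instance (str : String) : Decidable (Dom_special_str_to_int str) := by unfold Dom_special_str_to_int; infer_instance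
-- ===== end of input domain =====

-- B replaces A's reversed index loop with per-group pow(10, 3*count) by a left-to-right
-- Horner accumulation result = result*1000 + int(group) (objective: simpler).

-- ===== PORT A =====
def special_str_to_int (str : String) : Int :=
  let a := (PySem.Str.split? str ",").getD []
  let interval : Int := a.length
  -- int(a[i]) raises ValueError when a[i] is not int-like; Pre_ excludes that, getD 0 unreachable there
  let s := (PySem.List.pyRange (interval - 1) (-1) (-1)).foldl
    (fun (s : Int × Int) i =>
      (s.1 + ((PySem.Int.ofStr? (PySem.List.pyGetD a i "")).getD 0) * 10 ^ ((s.2 * 3).toNat),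
       s.2 + 1))
    (0, 0)
  s.1

-- ===== PORT B =====
def special_str_to_int_alt (str : String) : Int :=
  ((PySem.Str.split? str ",").getD []).foldl
    (fun result group => result * 1000 + (PySem.Int.ofStr? group).getD 0) 0

-- ===== PRECONDITION & SPEC =====
-- Pre_: every comma-separated group parses as a Python int; elsewhere A raises ValueError.
def Pre_special_str_to_int (str : String) : Prop :=
  ∀ g ∈ (PySem.Str.split? str ",").getD [], (PySem.Int.ofStr? g).isSome = true
instance (str : String) : Decidable (Pre_special_str_to_int str) := by
  unfold Pre_special_str_to_int; infer_instance

def pvWitness_special_str_to_int : String := "1,234,567"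

def Spec_special_str_to_int (str : String) (out : Int) : Prop := out = special_str_to_int_alt str
instance (str : String) (out : Int) : Decidable (Spec_special_str_to_int str out) := by
  unfold Spec_special_str_to_int; infer_instance

-- ===== CLAIM (what is proved, stated in full; the proofs are below) =====
def Claim_equal_special_str_to_int : Prop := ∀ (str : String), Dom_special_str_to_int str → Pre_special_str_to_int str → Spec_special_str_to_int str (special_str_to_int str)

-- ===== LEMMAS AND PROOFS =====

-- A's right-to-left power sum, started at any (acc, c) with 0 ≤ c, equals
-- acc + 1000^c times the Horner value of the values read back in left-to-right order.
theorem pv_hornerRev (ws : List Int) : ∀ (acc c : Int), 0 ≤ c →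
    (ws.foldl (fun (s : Int × Int) v => (s.1 + v * 10 ^ ((s.2 * 3).toNat), s.2 + 1)) (acc, c)).1
      = acc + 1000 ^ c.toNat * (ws.reverse.foldl (fun r v => r * 1000 + v) 0) := by
  induction ws with
  | nil => intro acc c _; simp
  | cons w ws ih =>
    intro acc c hc
    have h1 : (0:Int) ≤ c + 1 := by omega
    simp only [List.foldl_cons, List.reverse_cons, List.foldl_append, List.foldl_cons,
      List.foldl_nil, ih _ _ h1]
    have h2 : ((c + 1).toNat) = c.toNat + 1 := by omega
    have h3 : ((c * 3).toNat) = 3 * c.toNat := by omega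
    rw [h2, h3, pow_succ, pow_mul]
    ring

theorem special_str_to_int_spec : Claim_equal_special_str_to_int := by
  intro str _ _
  unfold Spec_special_str_to_int special_str_to_int special_str_to_int_alt
  set a := (PySem.Str.split? str ",").getD [] with ha
  simp only []
  -- turn the countdown range into the reverse of range(0, len a)
  have hr : PySem.List.pyRange ((a.length : Int) - 1) (-1) (-1)
      = (PySem.List.pyRange 0 (a.length : Int) 1).reverse := by
    rw [PySem.List.pyRange_neg_one_eq_reverse]; norm_num
  rw [hr]
  -- replace index lookups by the elements themselves
  have hmap : ((PySem.List.pyRange 0 (a.length : Int) 1).reverse.map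
      (fun i => PySem.List.pyGetD a i "")) = a.reverse := by
    rw [List.map_reverse, PySem.List.map_pyGetD_pyRange_zero']
  have hfold :
      ((PySem.List.pyRange 0 (a.length : Int) 1).reverse.foldl
        (fun (s : Int × Int) i =>
          (s.1 + ((PySem.Int.ofStr? (PySem.List.pyGetD a i "")).getD 0) * 10 ^ ((s.2 * 3).toNat),
           s.2 + 1)) (0, 0))
      = ((a.reverse.map (fun g => (PySem.Int.ofStr? g).getD 0)).foldl
        (fun (s : Int × Int) v => (s.1 + v * 10 ^ ((s.2 * 3).toNat), s.2 + 1)) (0, 0)) := by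
    rw [← hmap, List.map_map, List.foldl_map]
    rfl
  rw [hfold, pv_hornerRev _ 0 0 le_rfl]
  simp [← List.map_reverse, List.foldl_map]
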